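-- pv_equiv track=rewrite | github.com/pypi-data/pypi-mirror-395 | packages/hil-testbench/hil_testbench-0.1.3-py3-none-any.whl/hil_testbench/display/live_display.py | _reduce_states
-- ===== SOURCE A (Python) =====
-- from collections.abc import Iterable, Mapping, Sequence
--
-- def _reduce_states(states: Iterable[str]) -> str:
--     states_list = list(states)
--     if any(s == "bad" for s in states_list):
--         return "bad"
--     if any(s == "warn" for s in states_list):
--         return "warn"
--     if any(s == "good" for s in states_list):
--         return "good"
--     return "unknown"
-- ===== SOURCE B (Python) =====
-- def _reduce_states(states):
--     RANK = {"bad": 0, "warn": 1, "good": 2}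
--     best = 3
--     for s in states:
--         best = min(best, RANK.get(s, 3))
--     LABEL = {0: "bad", 1: "warn", 2: "good"}
--     return LABEL.get(best, "unknown")
-- ===== Notes on version B (the rewrite author's own statement) =====
-- stated objective: alternative
-- what changed: Replaces the three separate short-circuiting any-scans with one accumulating pass that tracks the minimum priority rank seen and maps it back to a label.
import Mathlib
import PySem

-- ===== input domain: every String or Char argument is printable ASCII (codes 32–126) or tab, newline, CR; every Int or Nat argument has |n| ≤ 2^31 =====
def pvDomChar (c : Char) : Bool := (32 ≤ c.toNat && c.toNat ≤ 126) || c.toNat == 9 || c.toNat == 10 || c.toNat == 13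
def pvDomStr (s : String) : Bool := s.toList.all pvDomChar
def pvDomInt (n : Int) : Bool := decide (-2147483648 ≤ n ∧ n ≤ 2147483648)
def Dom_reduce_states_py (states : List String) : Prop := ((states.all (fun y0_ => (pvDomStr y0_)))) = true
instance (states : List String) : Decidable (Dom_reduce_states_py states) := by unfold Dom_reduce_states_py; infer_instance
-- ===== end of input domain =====

-- B replaces A's three short-circuiting scans by one pass tracking the minimum priority rank; same result, alternative decomposition.


-- ===== PORT A =====
def reduce_states_py (states : List String) : String :=
  let states_list := states
  if states_list.any (fun s => s == "bad") then "bad"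
  else if states_list.any (fun s => s == "warn") then "warn"
  else if states_list.any (fun s => s == "good") then "good"
  else "unknown"

-- ===== PORT B =====
def pvRankDict : PySem.Dict String Nat := PySem.Dict.mk [("bad", 0), ("warn", 1), ("good", 2)]

def pvLabelDict : PySem.Dict Nat String := PySem.Dict.mk [(0, "bad"), (1, "warn"), (2, "good")]

def reduce_states_py_alt (states : List String) : String :=
  let best := states.foldl (fun best s => min best (PySem.Dict.getD pvRankDict s 3)) 3
  PySem.Dict.getD pvLabelDict best "unknown"

-- ===== PRECONDITION & SPEC =====
def Spec_reduce_states_py (states : List String) (out : String) : Prop := out = reduce_states_py_alt states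
instance (states : List String) (out : String) : Decidable (Spec_reduce_states_py states out) := by unfold Spec_reduce_states_py; infer_instance

-- ===== CLAIM (what is proved, stated in full; the proofs are below) =====
def Claim_equal_reduce_states_py : Prop := ∀ (states : List String), Dom_reduce_states_py states → Spec_reduce_states_py states (reduce_states_py states)

-- ===== LEMMAS AND PROOFS =====

-- rank of a list as A computes it: 0 if some "bad", else 1 if some "warn", else 2 if some "good", else 3
def pvRk (l : List String) : Nat :=
  if l.any (fun s => s == "bad") then 0
  else if l.any (fun s => s == "warn") then 1
  else if l.any (fun s => s == "good") then 2
  else 3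

theorem pvRank_eq (h : String) : PySem.Dict.getD pvRankDict h 3 =
    if h = "bad" then 0 else if h = "warn" then 1 else if h = "good" then 2 else 3 := by
  by_cases hb : h = "bad"
  · subst hb; decide
  by_cases hw : h = "warn"
  · subst hw; decide
  by_cases hg : h = "good"
  · subst hg; decide
  simp [pvRankDict, PySem.Dict.getD, PySem.Dict.get?,
    Ne.symm hb, Ne.symm hw, Ne.symm hg, hb, hw, hg]

theorem pvRk_cons (h : String) (t : List String) :
    pvRk (h :: t) = min (PySem.Dict.getD pvRankDict h 3) (pvRk t) := by
  rw [pvRank_eq]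
  simp only [pvRk, List.any_cons, Bool.or_eq_true, beq_iff_eq]
  by_cases hb : h = "bad" <;> by_cases hw : h = "warn" <;> by_cases hg : h = "good" <;>
    simp [hb, hw, hg] <;> split_ifs <;> omega

theorem pvFoldl_rank (l : List String) : ∀ b : Nat, b ≤ 3 →
    l.foldl (fun best s => min best (PySem.Dict.getD pvRankDict s 3)) b = min b (pvRk l) := by
  induction l with
  | nil => intro b hb; simp [pvRk]; omega
  | cons h t ih =>
    intro b hb
    have hr : PySem.Dict.getD pvRankDict h 3 ≤ 3 := by rw [pvRank_eq]; split_ifs <;> omega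
    simp only [List.foldl_cons, ih _ (by omega : min b (PySem.Dict.getD pvRankDict h 3) ≤ 3),
      pvRk_cons]
    omega

theorem pvRk_le (l : List String) : pvRk l ≤ 3 := by
  unfold pvRk; split_ifs <;> omega

-- ===== VERDICT (by name: the statement is the Claim_ definition above) =====
theorem reduce_states_py_spec : Claim_equal_reduce_states_py := by
  intro states _
  show (if states.any (fun s => s == "bad") then "bad"
        else if states.any (fun s => s == "warn") then "warn"
        else if states.any (fun s => s == "good") then "good" else "unknown")
      = pvLabelDict.getD (states.foldl (fun best s => min best (pvRankDict.getD s 3)) 3) "unknown"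
  rw [pvFoldl_rank states 3 (by omega)]
  have h3 := pvRk_le states
  have hmin : min 3 (pvRk states) = pvRk states := by omega
  rw [hmin]
  unfold pvRk
  split_ifs <;> decide
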